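-- pv_equiv track=rewrite | github.com/jfgoodall/advent-of-code | 2020/py/day24.py | init_space
-- ===== SOURCE A (Python) =====
-- from collections import defaultdict
--
-- def init_space(paths):
--     space = defaultdict(bool)
--     for path in paths:
--         x, y = 0, 0
--         for offset in path:
--             x += offset[0]
--             y += offset[1]
--         space[(x, y)] = not space[(x, y)]
--     return space
-- ===== SOURCE B (Python) =====
-- from collections import defaultdict
--
-- def init_space(paths):
--     # Staged nested-scan decomposition: materialise every path's endpoint,
--     # dedupe endpoints in first-occurrence order, then for each distinct
--     # endpoint scan the whole endpoint list with list.count for its parity.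
--     ends = [(sum(o[0] for o in p), sum(o[1] for o in p)) for p in paths]
--     space = defaultdict(bool)
--     for coord in dict.fromkeys(ends):
--         space[coord] = ends.count(coord) % 2 == 1
--     return space
-- ===== Notes on version B (the rewrite author's own statement) =====
-- stated objective: alternative
-- what changed: Replaces A's single-pass incremental boolean toggling of a dict with staged passes: build the list of path endpoints, dedupe it in first-occurrence order, then determine each distinct endpoint's state by a full list.count scan over the endpoint list.
import Mathlib
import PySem

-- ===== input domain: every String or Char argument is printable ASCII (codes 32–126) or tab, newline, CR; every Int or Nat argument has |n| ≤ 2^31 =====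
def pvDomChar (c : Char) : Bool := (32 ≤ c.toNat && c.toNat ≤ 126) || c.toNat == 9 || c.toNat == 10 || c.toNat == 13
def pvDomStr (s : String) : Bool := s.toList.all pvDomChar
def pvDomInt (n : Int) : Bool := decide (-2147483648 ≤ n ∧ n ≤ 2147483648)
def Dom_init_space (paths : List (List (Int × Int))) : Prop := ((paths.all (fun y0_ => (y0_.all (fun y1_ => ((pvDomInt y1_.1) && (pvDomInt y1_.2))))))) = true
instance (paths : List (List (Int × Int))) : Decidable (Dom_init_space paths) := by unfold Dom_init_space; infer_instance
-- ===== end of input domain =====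

-- B replaces A's single-pass incremental boolean toggling with staged passes:
-- endpoint list, ordered dedupe, then a full list.count scan per distinct
-- endpoint for its parity (objective: alternative decomposition).

-- ===== PORT A =====
-- A toggles space[(x,y)]; the defaultdict read inserts a missing key (with
-- False) and the assignment then overwrites it in place, which is exactly
-- one Dict.insert (append when missing, overwrite-in-place when present).
def init_space (paths : List (List (Int × Int))) : List (Int × Int × Bool) :=
  (paths.foldl
    (fun (space : PySem.Dict (Int × Int) Bool) path =>
      let xy := path.foldl (fun (s : Int × Int) o => (s.1 + o.1, s.2 + o.2)) (0, 0)
      space.insert xy (!(space.getD xy false)))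
    PySem.Dict.empty).items.map (fun p => (p.1.1, p.1.2, p.2))

-- ===== PORT B =====
-- ends = endpoint per path; dict.fromkeys dedupe is PySem.List.dedup; the
-- loop assigns each distinct key once (fresh-key inserts into the defaultdict).
def init_space_alt (paths : List (List (Int × Int))) : List (Int × Int × Bool) :=
  let ends := paths.map (fun p => ((p.map (·.1)).sum, (p.map (·.2)).sum))
  let space := (PySem.List.dedup ends).foldl
    (fun (d : PySem.Dict (Int × Int) Bool) c =>
      d.insert c (decide (ends.count c % 2 = 1)))
    PySem.Dict.empty
  space.items.map (fun p => (p.1.1, p.1.2, p.2))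

-- ===== PRECONDITION & SPEC =====
def Spec_init_space (paths : List (List (Int × Int))) (out : List (Int × Int × Bool)) : Prop := out = init_space_alt paths
instance (paths : List (List (Int × Int))) (out : List (Int × Int × Bool)) : Decidable (Spec_init_space paths out) := by unfold Spec_init_space; infer_instance

-- ===== CLAIM (what is proved, stated in full; the proofs are below) =====
def Claim_equal_init_space : Prop := ∀ (paths : List (List (Int × Int))), Dom_init_space paths → Spec_init_space paths (init_space paths)

-- ===== LEMMAS AND PROOFS =====

-- tile state as parity of an occurrence count
def pvParity (n : Int) : Bool := decide (PySem.Int.mod n 2 = 1)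

lemma pvParity_succ (n : Int) : pvParity (n + 1) = !pvParity n := by
  have h2 : ∀ m : Int, PySem.Int.mod m 2 = m % 2 := fun m =>
    PySem.Int.mod_eq_emod_of_pos (by norm_num)
  unfold pvParity
  rw [h2, h2]
  rcases Int.emod_two_eq n with h | h <;> simp [Int.add_emod, h]

-- A's toggle loop over the final coordinates produces, item for item,
-- the parity image of the Counter of those coordinates.
lemma toggle_items_eq (ks : List (Int × Int)) :
    (ks.foldl (fun (d : PySem.Dict (Int × Int) Bool) k => d.insert k (!(d.getD k false)))
      PySem.Dict.empty).items
    = (PySem.Dict.counter ks).items.map (fun p => (p.1, pvParity p.2)) := by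
  induction ks using List.reverseRecOn with
  | nil => simp [PySem.Dict.counter, PySem.Dict.empty]
  | append_singleton ks k ih =>
    rw [List.foldl_append, List.foldl_cons, List.foldl_nil,
      PySem.Dict.counter_append_singleton]
    set t := ks.foldl (fun (d : PySem.Dict (Int × Int) Bool) k => d.insert k (!(d.getD k false)))
      PySem.Dict.empty with ht
    set c := PySem.Dict.counter ks with hc
    have hcontains : t.contains k = c.contains k := by
      simp only [PySem.Dict.contains]
      rw [show t.items = c.items.map (fun p => (p.1, pvParity p.2)) from ih, List.any_map]
      rfl
    have hget : t.get? k = (c.get? k).map (fun n => pvParity n) := by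
      simp only [PySem.Dict.get?]
      rw [show t.items = c.items.map (fun p => (p.1, pvParity p.2)) from ih, List.find?_map]
      rcases hf : c.items.find? (fun p => p.1 == k) with _ | p <;>
        simp [Function.comp_def, hf]
    have hgetD : t.getD k false = pvParity (c.getD k 0) := by
      simp only [PySem.Dict.getD, hget]
      rcases c.get? k with _ | n
      · simp [pvParity, PySem.Int.mod]
      · simp
    rcases hck : c.contains k with _ | _
    · -- key is fresh on both sides: both append
      rw [PySem.Dict.modify, PySem.Dict.items_insert_of_not_contains _ _ hck,
        PySem.Dict.items_insert_of_not_contains _ _ (hcontains.trans hck)]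
      have hc0 : c.getD k 0 = 0 := PySem.Dict.getD_of_not_contains _ _ hck
      simp [ih, hgetD, hc0]
      decide
    · -- key present: both overwrite in place
      rw [PySem.Dict.modify, PySem.Dict.items_insert_of_contains _ _ hck,
        PySem.Dict.items_insert_of_contains _ _ (hcontains.trans hck)]
      rw [show t.items = c.items.map (fun p => (p.1, pvParity p.2)) from ih,
        List.map_map, List.map_map]
      refine List.map_congr_left (fun p _ => ?_)
      by_cases hp : p.1 = k
      · simp [hp, hgetD, pvParity_succ]
      · simp [hp]

-- B's loop inserts pairwise-distinct fresh keys, so its dict just lays out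
-- the distinct endpoints with their count parities.
lemma alt_space_items (ks : List (Int × Int)) :
    ((PySem.List.dedup ks).foldl
      (fun (d : PySem.Dict (Int × Int) Bool) c =>
        d.insert c (decide (ks.count c % 2 = 1)))
      PySem.Dict.empty).items
    = (PySem.List.dedup ks).map (fun c => (c, decide (ks.count c % 2 = 1))) := by
  rw [PySem.Dict.items_foldl_insert_fresh _ _ _ _
    (fun a _ => PySem.Dict.contains_empty _)
    (by simp)]
  simp [PySem.Dict.empty]

-- the Nat-count parity B computes is pvParity of the Int count A's dict holds
lemma pvParity_natCast (n : Nat) : pvParity (n : Int) = decide (n % 2 = 1) := by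
  unfold pvParity
  rw [show ((2 : Int)) = ((2 : Nat) : Int) by norm_num, PySem.Int.mod_natCast]
  simp only [decide_eq_decide]
  omega

-- A's joint coordinate fold computes the two component sums.
lemma path_fold_eq (path : List (Int × Int)) :
    path.foldl (fun (s : Int × Int) o => (s.1 + o.1, s.2 + o.2)) (0, 0)
    = ((path.map (·.1)).sum, (path.map (·.2)).sum) := by
  rw [PySem.List.foldl_prod_mk (fun a (o : Int × Int) => a + o.1)
    (fun a (o : Int × Int) => a + o.2)]
  simp [List.sum_eq_foldl, List.foldl_map]

-- ===== VERDICT (by name: the statement is the Claim_ definition above) =====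
theorem init_space_spec : Claim_equal_init_space := by
  intro paths _
  show init_space paths = init_space_alt paths
  unfold init_space
  simp only [init_space_alt]
  have hpaths : paths.foldl
      (fun (space : PySem.Dict (Int × Int) Bool) path =>
        let xy := path.foldl (fun (s : Int × Int) o => (s.1 + o.1, s.2 + o.2)) (0, 0)
        space.insert xy (!(space.getD xy false)))
      PySem.Dict.empty
      = (paths.map (fun path => ((path.map (·.1)).sum, (path.map (·.2)).sum))).foldl
        (fun (d : PySem.Dict (Int × Int) Bool) k => d.insert k (!(d.getD k false)))
        PySem.Dict.empty := by
    rw [List.foldl_map]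
    exact PySem.List.foldl_congr_mem _ _ _ _ (fun d path _ => by rw [path_fold_eq])
  rw [hpaths, toggle_items_eq, alt_space_items, PySem.Dict.items_counter,
    List.map_map, List.map_map, List.map_map]
  refine List.map_congr_left (fun c _ => ?_)
  simp [Function.comp_def, pvParity_natCast]
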